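-- pv_equiv track=rewrite | github.com/stoneboat/dpsgd-auditbench | src/train_dpftrl.py | _bit_decomposition_set
-- ===== SOURCE A (Python) =====
-- def _bit_decomposition_set(n: int) -> set:
--     """Set of (level, idx) canonical nodes covering [0..n-1]; empty for n<=0."""
--     out: set = set()
--     if n <= 0:
--         return out
--     offset = 0
--     msb = n.bit_length() - 1
--     for level in range(msb, -1, -1):
--         if n & (1 << level):
--             out.add((level, offset >> level))
--             offset += 1 << level
--     return out
-- ===== SOURCE B (Python) =====
-- def _bit_decomposition_set(n: int) -> set:
--     """Greedy interval cover: walk p from 0 to n, at each step take the largest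
--     aligned dyadic block [p, p+2**level) that fits in [0, n)."""
--     out: set = set()
--     p = 0
--     while p < n:
--         level = (n - p).bit_length() - 1
--         while p % (1 << level):
--             level -= 1
--         out.add((level, p >> level))
--         p += 1 << level
--     return out
-- ===== Notes on version B (the rewrite author's own statement) =====
-- stated objective: alternative
-- what changed: Replaces A's descending scan over the bit positions of n (testing n & (1<<level) and accumulating an offset) by a greedy interval-covering walk of positions p = 0..n that at each step takes the largest aligned dyadic block fitting in the remainder.
import Mathlib
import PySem

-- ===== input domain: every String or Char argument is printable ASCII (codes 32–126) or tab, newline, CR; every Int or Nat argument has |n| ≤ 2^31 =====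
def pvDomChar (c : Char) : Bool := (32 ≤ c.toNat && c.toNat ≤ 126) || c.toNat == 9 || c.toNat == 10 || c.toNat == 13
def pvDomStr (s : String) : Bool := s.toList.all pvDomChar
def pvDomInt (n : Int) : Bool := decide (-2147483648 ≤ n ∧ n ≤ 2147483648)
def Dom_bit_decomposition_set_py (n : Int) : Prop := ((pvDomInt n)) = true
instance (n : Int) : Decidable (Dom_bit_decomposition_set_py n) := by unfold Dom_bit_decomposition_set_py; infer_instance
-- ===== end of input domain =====

-- B replaces A's scan over the bit positions of n (with an offset accumulator) by a greedy
-- interval-covering walk of positions p = 0 → n that takes the largest aligned dyadic block each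
-- step (objective: alternative). Both return the same set, built in the same insertion order.

-- ===== PORT A =====
-- A's loop body, fixed n (as the natural m = n.toNat, n > 0).  Python 'n & (1 << level)' is
-- 'm &&& (1 <<< level)'; the set insert is PySem.Set.add; level and offset are nonnegative ints,
-- so Nat with a cast to Int in the stored pair is exact.
def pvStepA (m : Nat) (st : List (Int × Int) × Nat) (level : Nat) : List (Int × Int) × Nat :=
  if m &&& (1 <<< level) ≠ 0 then
    (PySem.Set.add st.1 (((level : Nat) : Int), ((st.2 >>> level : Nat) : Int)), st.2 + (1 <<< level))
  else st

def bit_decomposition_set_py (n : Int) : List (Int × Int) :=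
  if n ≤ 0 then [] else
    -- msb = n.bit_length() - 1 = Nat.log2 n  (exact for n > 0); range(msb, -1, -1) is the
    -- descending list msb, …, 0, i.e. (List.range (msb+1)).reverse
    ((List.range (n.toNat.log2 + 1)).reverse.foldl (pvStepA n.toNat) ([], 0)).1

-- ===== PORT B =====
-- inner 'while p % (1 << level): level -= 1' of Source B
def pvAltLevel (p level : Nat) : Nat :=
  if p % (1 <<< level) ≠ 0 then pvAltLevel p (level - 1) else level
termination_by level
decreasing_by
  rename_i h
  cases level with
  | zero => simp [Nat.shiftLeft_eq] at h; omega
  | succ l => omega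

-- outer 'while p < n' of Source B; (n - p).bit_length() - 1 = Nat.log2 (n - p) for p < n
def pvAltGo (n p : Nat) (out : List (Int × Int)) : List (Int × Int) :=
  if p < n then
    pvAltGo n (p + (1 <<< pvAltLevel p (n - p).log2))
      (PySem.Set.add out ((pvAltLevel p (n - p).log2 : Nat) , ((p >>> pvAltLevel p (n - p).log2 : Nat) : Int)))
  else out
termination_by n - p
decreasing_by
  rename_i h
  have h1 : 0 < 1 <<< pvAltLevel p (n - p).log2 := by rw [Nat.shiftLeft_eq]; positivity
  omega

-- Source B's p starts at 0 and only grows, so it is a natural; for n ≤ 0 the while loop never runs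
-- (n.toNat = 0) and the empty set is returned, exactly as in Python.
def bit_decomposition_set_py_alt (n : Int) : List (Int × Int) :=
  pvAltGo n.toNat 0 []

-- ===== PRECONDITION & SPEC =====
def Spec_bit_decomposition_set_py (n : Int) (out : List (Int × Int)) : Prop := out = bit_decomposition_set_py_alt n
instance (n : Int) (out : List (Int × Int)) : Decidable (Spec_bit_decomposition_set_py n out) := by unfold Spec_bit_decomposition_set_py; infer_instance

-- ===== CLAIM (what is proved, stated in full; the proofs are below) =====
def Claim_equal_bit_decomposition_set_py : Prop := ∀ (n : Int), Dom_bit_decomposition_set_py n → Spec_bit_decomposition_set_py n (bit_decomposition_set_py n)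

-- ===== LEMMAS AND PROOFS =====

lemma pvLoop (m : Nat) : ∀ (j : Nat) (out : List (Int × Int)),
    pvAltGo m (m / 2 ^ j * 2 ^ j) out
      = ((List.range j).reverse.foldl (pvStepA m) (out, m / 2 ^ j * 2 ^ j)).1 := by
  intro j
  induction j with
  | zero =>
    intro out
    have hp : m / 2 ^ 0 * 2 ^ 0 = m := by simp
    rw [hp, pvAltGo]
    simp
  | succ j ih =>
    intro out
    have hrange : (List.range (j + 1)).reverse = j :: (List.range j).reverse := by
      simp [List.range_succ]
    rw [hrange, List.foldl_cons]
    set x := m / 2 ^ j with hxdef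
    set P := (2 : Nat) ^ j with hPdef
    have hx : m / 2 ^ (j + 1) = x / 2 := by
      rw [hxdef, Nat.div_div_eq_div_mul, pow_succ]
    set q := x / 2 with hqdef
    have hpform : m / 2 ^ (j + 1) * 2 ^ (j + 1) = q * (P * 2) := by
      rw [hx, pow_succ]
    have Ppos : 0 < P := Nat.two_pow_pos j
    rw [hpform]
    by_cases hb : m.testBit j
    · -- bit j of m is set
      have hmod : x % 2 = 1 := by
        have h := @Nat.testBit_eq_decide_div_mod_eq j m
        rw [hb] at h
        exact of_decide_eq_true h.symm
      have hqx : x = 2 * q + 1 := by omega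
      have key1 : q * (P * 2) + P = x * P := by rw [hqx]; ring
      have key2 : x * P + m % P = m := by
        rw [Nat.mul_comm]
        exact Nat.div_add_mod m P
      have key3 : m % P < P := Nat.mod_lt _ Ppos
      have hlt : q * (P * 2) < m := by
        revert key1 key2 key3
        generalize x * P = A
        generalize q * (P * 2) = B
        generalize m % P = R
        omega
      have hsubeq : m - q * (P * 2) = P + m % P := by
        revert key1 key2 key3
        generalize x * P = A
        generalize q * (P * 2) = B
        generalize m % P = R
        omega
      have hlog : (m - q * (P * 2)).log2 = j := by
        rw [hsubeq]
        have hne : P + m % P ≠ 0 := by omega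
        have hle : j ≤ (P + m % P).log2 := (Nat.le_log2 hne).mpr (by omega)
        have hltl : (P + m % P).log2 < j + 1 := by
          rw [Nat.log2_lt hne, pow_succ]
          omega
        omega
      have hlevel : pvAltLevel (q * (P * 2)) j = j := by
        rw [pvAltLevel]
        have : q * (P * 2) % (1 <<< j) = 0 := by
          rw [Nat.shiftLeft_eq, one_mul, ← hPdef, show q * (P * 2) = q * 2 * P by ring]
          exact Nat.mul_mod_left _ _
        simp [this]
      have hstepA : pvStepA m (out, q * (P * 2)) j
          = (PySem.Set.add out (((j : Nat) : Int), ((q * (P * 2)) >>> j : Nat)),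
             q * (P * 2) + 1 <<< j) := by
        unfold pvStepA
        rw [Nat.shiftLeft_eq, one_mul, Nat.and_two_pow, hb]
        simp
      rw [pvAltGo, if_pos hlt, hlog, hlevel, hstepA]
      have hnewp : q * (P * 2) + 1 <<< j = x * P := by
        rw [Nat.shiftLeft_eq, one_mul, ← hPdef]
        exact key1
      rw [hnewp]
      exact ih _
    · -- bit j of m is clear
      have hmod : x % 2 = 0 := by
        have h := @Nat.testBit_eq_decide_div_mod_eq j m
        rcases Nat.mod_two_eq_zero_or_one x with h0 | h1
        · exact h0
        · exfalso; apply hb; rw [h, decide_eq_true_eq]; exact h1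
      have hpeq : q * (P * 2) = x * P := by
        have h2 : q * 2 = x := by omega
        calc q * (P * 2) = q * 2 * P := by ring
          _ = x * P := by rw [h2]
      have hstepA : pvStepA m (out, q * (P * 2)) j = (out, q * (P * 2)) := by
        unfold pvStepA
        rw [Nat.shiftLeft_eq, one_mul, Nat.and_two_pow]
        simp [hb]
      rw [hstepA, hpeq]
      exact ih out

-- ===== VERDICT (by name: the statement is the Claim_ definition above) =====
theorem bit_decomposition_set_py_spec : Claim_equal_bit_decomposition_set_py := by
  intro n _
  unfold Spec_bit_decomposition_set_py bit_decomposition_set_py bit_decomposition_set_py_alt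
  by_cases hn : n ≤ 0
  · have h0 : n.toNat = 0 := Int.toNat_of_nonpos hn
    rw [if_pos hn, h0, pvAltGo]
    simp
  · rw [if_neg hn]
    have hm : n.toNat ≠ 0 := by omega
    have hlt : n.toNat < 2 ^ (n.toNat.log2 + 1) := (Nat.log2_lt hm).mp (Nat.lt_succ_self _)
    have hz : n.toNat / 2 ^ (n.toNat.log2 + 1) * 2 ^ (n.toNat.log2 + 1) = 0 := by
      rw [Nat.div_eq_of_lt hlt]; ring
    have := pvLoop n.toNat (n.toNat.log2 + 1) []
    rw [hz] at this
    exact this.symm
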